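-- pv_equiv track=rewrite | github.com/andela-angene/Algorithmic-Problem-Solving | Hackerrank/algorithms/search/09-maximum-sub-array-sum.py | find_max_mod
-- ===== SOURCE A (Python) =====
-- import bisect
--
-- def find_max_mod(n, m, ar):
--     ar[0] = ar[0] % m
--     sub, max_mod = [], 0
--
--     for i in range(1, n):
--         ar[i] = (ar[i - 1] + ar[i]) % m
--
--     for i in range(n):
--         item = ar[i]
--         position = bisect.bisect_right(sub, item)
--         j = sub[position] if position < i else 0
--         if j > item:
--             max_mod = max(max_mod, (item - j + m) % m)
--         bisect.insort(sub, item)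
--         max_mod = max(max_mod, item)
--
--     return max_mod
-- ===== SOURCE B (Python) =====
-- def find_max_mod(n, m, ar):
--     ar[0] = ar[0] % m
--     for i in range(1, n):
--         ar[i] = (ar[i - 1] + ar[i]) % m
--     best = 0
--     for r in range(n):
--         best = max(best, ar[r])
--         for l in range(r):
--             best = max(best, (ar[r] - ar[l] + m) % m)
--     return best
-- ===== Notes on version B (the rewrite author's own statement) =====
-- stated objective: simpler
-- what changed: The sorted-list + bisect/insort scan that finds the smallest strictly-greater earlier prefix is replaced by a plain nested scan taking the max of (prefix[r]-prefix[l]+m)%m over all earlier prefixes; same in-place prefix loop, no auxiliary sorted structure.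
import Mathlib
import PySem

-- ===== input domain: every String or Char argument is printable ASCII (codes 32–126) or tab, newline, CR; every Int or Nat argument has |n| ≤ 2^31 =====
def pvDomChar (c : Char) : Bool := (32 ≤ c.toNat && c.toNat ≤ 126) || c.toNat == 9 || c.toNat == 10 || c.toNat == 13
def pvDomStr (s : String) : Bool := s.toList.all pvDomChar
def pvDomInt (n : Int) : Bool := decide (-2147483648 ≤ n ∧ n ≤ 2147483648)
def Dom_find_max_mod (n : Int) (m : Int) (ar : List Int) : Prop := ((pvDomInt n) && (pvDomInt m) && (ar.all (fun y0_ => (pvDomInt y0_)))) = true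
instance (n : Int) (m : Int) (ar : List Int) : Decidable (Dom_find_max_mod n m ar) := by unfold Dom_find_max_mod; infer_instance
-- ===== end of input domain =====

-- B replaces A's sorted-list + bisect/insort scan by a plain nested scan over all earlier
-- prefix sums (same return value; both versions mutate ar into its prefix sums mod m in place,
-- and the equivalence proved here is about the return value).

-- ===== PORT A =====
def find_max_mod (n : Int) (m : Int) (ar : List Int) : Int :=
  -- ar[0] = ar[0] % m
  let ar1 := PySem.List.pySetD ar 0 (PySem.Int.mod (PySem.List.pyGetD ar 0 0) m)
  -- for i in range(1, n): ar[i] = (ar[i-1] + ar[i]) % m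
  let ar2 := (PySem.List.pyRange 1 n 1).foldl (fun a i =>
      PySem.List.pySetD a i (PySem.Int.mod (PySem.List.pyGetD a (i - 1) 0 + PySem.List.pyGetD a i 0) m)) ar1
  -- sub, max_mod = [], 0 ; for i in range(n): …
  let st := (PySem.List.pyRange 0 n 1).foldl (fun (st : List Int × Int) i =>
      let item := PySem.List.pyGetD ar2 i 0
      let position := PySem.List.bisectRight st.1 item
      let j := if (position : Int) < i then PySem.List.pyGetD st.1 (position : Int) 0 else 0
      let mm := if j > item then max st.2 (PySem.Int.mod (item - j + m) m) else st.2
      (PySem.List.insert st.1 (position : Int) item, max mm item)) ([], 0)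
  st.2

-- ===== PORT B =====
def find_max_mod_alt (n : Int) (m : Int) (ar : List Int) : Int :=
  -- ar[0] = ar[0] % m
  let ar1 := PySem.List.pySetD ar 0 (PySem.Int.mod (PySem.List.pyGetD ar 0 0) m)
  -- for i in range(1, n): ar[i] = (ar[i-1] + ar[i]) % m
  let ar2 := (PySem.List.pyRange 1 n 1).foldl (fun a i =>
      PySem.List.pySetD a i (PySem.Int.mod (PySem.List.pyGetD a (i - 1) 0 + PySem.List.pyGetD a i 0) m)) ar1
  -- best = 0 ; for r in range(n): best = max(best, ar[r]); for l in range(r): …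
  (PySem.List.pyRange 0 n 1).foldl (fun best r =>
      (PySem.List.pyRange 0 r 1).foldl (fun b l =>
          max b (PySem.Int.mod (PySem.List.pyGetD ar2 r 0 - PySem.List.pyGetD ar2 l 0 + m) m))
        (max best (PySem.List.pyGetD ar2 r 0))) 0

-- ===== PRECONDITION & SPEC =====
-- Pre_ excludes exactly the inputs where A raises: m = 0 (ZeroDivisionError), ar = []
-- (IndexError on ar[0]), and n > len(ar) (IndexError in the loops).
def Pre_find_max_mod (n : Int) (m : Int) (ar : List Int) : Prop :=
  m ≠ 0 ∧ ar ≠ [] ∧ n ≤ (ar.length : Int)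
instance (n : Int) (m : Int) (ar : List Int) : Decidable (Pre_find_max_mod n m ar) := by
  unfold Pre_find_max_mod; infer_instance

def pvWitness_find_max_mod : Int × Int × List Int := (3, 5, [2, 9, 4])

def Spec_find_max_mod (n : Int) (m : Int) (ar : List Int) (out : Int) : Prop := out = find_max_mod_alt n m ar
instance (n : Int) (m : Int) (ar : List Int) (out : Int) : Decidable (Spec_find_max_mod n m ar out) := by unfold Spec_find_max_mod; infer_instance

-- ===== CLAIM (what is proved, stated in full; the proofs are below) =====
def Claim_equal_find_max_mod : Prop := ∀ (n : Int) (m : Int) (ar : List Int), Dom_find_max_mod n m ar → Pre_find_max_mod n m ar → Spec_find_max_mod n m ar (find_max_mod n m ar)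

-- ===== LEMMAS AND PROOFS =====

-- The common prefix-sum list (the mutated ar), same expression as in both ports.
def pvP (n : Int) (m : Int) (ar : List Int) : List Int :=
  (PySem.List.pyRange 1 n 1).foldl (fun a i =>
      PySem.List.pySetD a i (PySem.Int.mod (PySem.List.pyGetD a (i - 1) 0 + PySem.List.pyGetD a i 0) m))
    (PySem.List.pySetD ar 0 (PySem.Int.mod (PySem.List.pyGetD ar 0 0) m))

-- One step of A's second loop (i : Int is the loop index).
def pvStepA (m : Int) (P : List Int) (st : List Int × Int) (i : Int) : List Int × Int :=
  let item := PySem.List.pyGetD P i 0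
  let position := PySem.List.bisectRight st.1 item
  let j := if (position : Int) < i then PySem.List.pyGetD st.1 (position : Int) 0 else 0
  let mm := if j > item then max st.2 (PySem.Int.mod (item - j + m) m) else st.2
  (PySem.List.insert st.1 (position : Int) item, max mm item)

-- One step of B's outer loop (r : Int is the loop index).
def pvStepB (m : Int) (P : List Int) (best : Int) (r : Int) : Int :=
  (PySem.List.pyRange 0 r 1).foldl (fun b l =>
      max b (PySem.Int.mod (PySem.List.pyGetD P r 0 - PySem.List.pyGetD P l 0 + m) m))
    (max best (PySem.List.pyGetD P r 0))

lemma pvPortA_eq (n m : Int) (ar : List Int) :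
    find_max_mod n m ar = ((PySem.List.pyRange 0 n 1).foldl (pvStepA m (pvP n m ar)) ([], 0)).2 := rfl

lemma pvPortB_eq (n m : Int) (ar : List Int) :
    find_max_mod_alt n m ar = (PySem.List.pyRange 0 n 1).foldl (pvStepB m (pvP n m ar)) 0 := rfl

-- a fold of maxes over candidates that are all ≤ the accumulator leaves it unchanged
lemma pvFoldl_max_absorb {g : Int → Int} (L : List Int) (a : Int) (h : ∀ y ∈ L, g y ≤ a) :
    L.foldl (fun b y => max b (g y)) a = a := by
  induction L with
  | nil => rfl
  | cons x xs ih =>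
      have hx : g x ≤ a := h x (by simp)
      simp only [List.foldl_cons, max_eq_left hx]
      exact ih (fun y hy => h y (by simp [hy]))

-- every entry of pvP with index < n is a value of (· % m)
lemma pvP_modvals (n m : Int) (ar : List Int) (har : ar ≠ []) (hlen : n ≤ (ar.length : Int)) :
    ∀ k : Nat, (k : Int) < n → ∃ y, (pvP n m ar).getD k 0 = PySem.Int.mod y m := by
  have hpos : 0 < ar.length := List.length_pos_of_ne_nil har
  unfold pvP
  rw [PySem.List.pyRange_one]
  simp only [List.foldl_map]
  set step := fun (a : List Int) (i : Int) =>
    PySem.List.pySetD a i (PySem.Int.mod (PySem.List.pyGetD a (i - 1) 0 + PySem.List.pyGetD a i 0) m) with hstep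
  set init := PySem.List.pySetD ar 0 (PySem.Int.mod (PySem.List.pyGetD ar 0 0) m) with hinit
  have hQ : ∀ t : Nat, (t : Int) ≤ n - 1 →
      ((List.range t).foldl (fun a (k : Nat) => step a (1 + (k : Int))) init).length = ar.length ∧
      ∀ k : Nat, k ≤ t →
        ∃ y, ((List.range t).foldl (fun a (k : Nat) => step a (1 + (k : Int))) init).getD k 0 =
          PySem.Int.mod y m := by
    intro t
    induction t with
    | zero =>
        intro _
        constructor
        · simp [hinit, PySem.List.pySetD_of_nonneg]
        · intro k hk
          interval_cases k
          refine ⟨PySem.List.pyGetD ar 0 0, ?_⟩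
          simp [hinit, PySem.List.pySetD_of_nonneg, List.getD_eq_getElem?_getD,
            List.getElem_set_self, hpos]
    | succ t ih =>
        intro ht
        have ht' : (t : Int) ≤ n - 1 := by push_cast at ht ⊢; omega
        obtain ⟨ihlen, ihmod⟩ := ih ht'
        have hlt : t + 1 < ar.length := by
          have : ((t : Int) + 1) < (ar.length : Int) := by push_cast at ht; omega
          omega
        rw [List.range_succ, List.foldl_append]
        set a := (List.range t).foldl (fun a (k : Nat) => step a (1 + (k : Int))) init with ha
        simp only [List.foldl_cons, List.foldl_nil, hstep]
        have hcast : (1 : Int) + (t : Int) = ((t + 1 : Nat) : Int) := by push_cast; ring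
        rw [hcast, PySem.List.pySetD_natCast]
        constructor
        · rw [List.length_set]; exact ihlen
        · intro k hk
          rcases Nat.lt_or_ge k (t + 1) with hk' | hk'
          · obtain ⟨y, hy⟩ := ihmod k (by omega)
            refine ⟨y, ?_⟩
            rw [List.getD_eq_getElem?_getD, List.getElem?_set_ne (by omega),
              ← List.getD_eq_getElem?_getD, hy]
          · have hk2 : k = t + 1 := by omega
            subst hk2
            refine ⟨PySem.List.pyGetD a (((t + 1 : Nat) : Int) - 1) 0 + PySem.List.pyGetD a (((t + 1 : Nat) : Int)) 0, ?_⟩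
            rw [List.getD_eq_getElem?_getD]
            simp [ihlen ▸ hlt]
  intro k hk
  have hn1 : (0 : Int) ≤ n - 1 := by have : (0 : Int) ≤ (k : Int) := by positivity
                                     omega
  have hkT : k ≤ (n - 1).toNat := by omega
  have hT : ((n - 1).toNat : Int) ≤ n - 1 := by omega
  exact (hQ (n - 1).toNat hT).2 k hkT

lemma pvmod_id {m : Int} (hm : 0 < m) {x : Int} (h0 : 0 ≤ x) (h1 : x < m) :
    PySem.Int.mod x m = x := by
  rw [PySem.Int.mod_eq_emod_of_pos hm]; exact Int.emod_eq_of_lt h0 h1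

lemma pvmod_small {m : Int} (hm : 0 < m) {x : Int} (h0 : 0 ≤ x) (h1 : x < m) :
    PySem.Int.mod (x + m) m = x := by
  rw [PySem.Int.mod_eq_emod_of_pos hm]
  have h2 : (x + m) % m = x % m := by
    have h := Int.add_mul_emod_self_left (a := x) (b := m) (c := 1)
    rwa [mul_one] at h

  rw [h2]; exact Int.emod_eq_of_lt h0 h1

-- one parallel step of the two second loops
lemma pvStep_key (m : Int) (P : List Int) (hm : m ≠ 0) (sub : List Int) (b : Int) (t : Nat)
    (hperm : sub.Perm ((List.range t).map (fun k => P.getD k 0)))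
    (hsorted : sub.Pairwise (· ≤ ·))
    (hlen : sub.length = t)
    (hb : 0 ≤ b)
    (hvs : ∀ y ∈ sub, ∃ z, y = PySem.Int.mod z m)
    (hitem : ∃ z, P.getD t 0 = PySem.Int.mod z m) :
    (pvStepA m P (sub, b) (t : Int)).1.Perm ((List.range (t + 1)).map (fun k => P.getD k 0)) ∧
    (pvStepA m P (sub, b) (t : Int)).1.Pairwise (· ≤ ·) ∧
    (pvStepA m P (sub, b) (t : Int)).1.length = t + 1 ∧
    0 ≤ (pvStepA m P (sub, b) (t : Int)).2 ∧
    (pvStepA m P (sub, b) (t : Int)).2 = pvStepB m P b (t : Int) := by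
  have hitem' : PySem.List.pyGetD P (t : Int) 0 = P.getD t 0 := PySem.List.pyGetD_natCast P t 0
  set item := P.getD t 0 with hitemdef
  set pos := PySem.List.bisectRight sub item with hposdef
  obtain ⟨hpos_le, hle, hgt⟩ := PySem.List.bisectRight_spec sub item hsorted
  have htake : ∀ y ∈ sub.take pos, y ≤ item := by
    intro y hy
    rw [List.mem_take_iff_getElem] at hy
    obtain ⟨j, hj, rfl⟩ := hy
    exact hle j (by omega) (by omega)
  have hdrop : ∀ y ∈ sub.drop pos, item < y := by
    intro y hy
    rw [List.mem_drop_iff_getElem] at hy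
    obtain ⟨j, hj, rfl⟩ := hy
    exact hgt (pos + j) (by omega) (by omega)
  have hfst : (pvStepA m P (sub, b) (t : Int)).1 = sub.take pos ++ item :: sub.drop pos := by
    simp only [pvStepA, hitem']
    exact PySem.List.insert_natCast sub pos item hpos_le
  -- Perm
  have hperm' : (pvStepA m P (sub, b) (t : Int)).1.Perm
      ((List.range (t + 1)).map (fun k => P.getD k 0)) := by
    rw [hfst, List.range_succ, List.map_append]
    have h1 : (sub.take pos ++ item :: sub.drop pos).Perm (item :: sub) := by
      have h := List.perm_middle (a := item) (l₁ := sub.take pos) (l₂ := sub.drop pos)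
      rwa [List.take_append_drop] at h
    refine h1.trans ?_
    refine (hperm.cons item).trans ?_
    exact (List.perm_append_singleton item ((List.range t).map (fun k => P.getD k 0))).symm
  -- Pairwise
  have hpw : (pvStepA m P (sub, b) (t : Int)).1.Pairwise (· ≤ ·) := by
    rw [hfst, List.pairwise_append]
    refine ⟨List.Pairwise.sublist (List.take_sublist _ _) hsorted, ?_, ?_⟩
    · rw [List.pairwise_cons]
      exact ⟨fun y hy => le_of_lt (hdrop y hy),
        List.Pairwise.sublist (List.drop_sublist _ _) hsorted⟩
    · intro a ha c hc
      rcases List.mem_cons.mp hc with rfl | hc'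
      · exact htake a ha
      · exact le_trans (htake a ha) (le_of_lt (hdrop c hc'))
  -- length
  have hlen' : (pvStepA m P (sub, b) (t : Int)).1.length = t + 1 := by
    rw [hfst]; simp [← hlen]
  -- the returned best values
  have hsndA : (pvStepA m P (sub, b) (t : Int)).2 =
      max (if (if (pos : Int) < (t : Int) then sub.getD pos 0 else 0) > item
           then max b (PySem.Int.mod (item - (if (pos : Int) < (t : Int) then sub.getD pos 0 else 0) + m) m)
           else b) item := by
    simp only [pvStepA, hitem', PySem.List.pyGetD_natCast, ← hposdef]
  have hsndB : pvStepB m P b (t : Int) =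
      sub.foldl (fun bb y => max bb (PySem.Int.mod (item - y + m) m)) (max b item) := by
    unfold pvStepB
    rw [PySem.List.pyRange_one]
    simp only [Int.sub_zero, Int.toNat_natCast, List.foldl_map, zero_add, hitem',
      PySem.List.pyGetD_natCast]
    rw [← List.foldl_map (f := fun k => P.getD k 0)
      (g := fun bb y => max bb (PySem.Int.mod (item - y + m) m))]
    haveI : RightCommutative (fun (bb y : Int) => max bb (PySem.Int.mod (item - y + m) m)) :=
      ⟨fun bb y y' => max_right_comm bb _ _⟩
    exact (List.Perm.foldl_eq hperm _).symm
  rcases lt_or_gt_of_ne hm with hneg | hpos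
  · -- m < 0 : every candidate is ≤ 0, both sides stay at b
    have hitem0 : item ≤ 0 := by
      obtain ⟨z, hz⟩ := hitem; rw [hz]; exact (PySem.Int.mod_neg_bounds z hneg).2
    have hBb : pvStepB m P b (t : Int) = b := by
      rw [hsndB, max_eq_left (le_trans hitem0 hb)]
      exact pvFoldl_max_absorb sub b
        (fun y _ => le_trans (PySem.Int.mod_neg_bounds _ hneg).2 hb)
    have hAb : (pvStepA m P (sub, b) (t : Int)).2 = b := by
      rw [hsndA]
      generalize (if ((pos : Int)) < (t : Int) then sub.getD pos 0 else 0) = j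
      have hmb := (PySem.Int.mod_neg_bounds (item - j + m) hneg).2
      split_ifs with h <;> omega
    refine ⟨hperm', hpw, hlen', ?_, ?_⟩
    · rw [hAb]; exact hb
    · rw [hAb, hBb]
  · -- 0 < m
    have hitemb : 0 ≤ item ∧ item < m := by
      obtain ⟨z, hz⟩ := hitem
      rw [hz]
      exact ⟨PySem.Int.mod_nonneg z hpos, PySem.Int.mod_lt z hpos⟩
    have hyb : ∀ y ∈ sub, 0 ≤ y ∧ y < m := by
      intro y hy
      obtain ⟨z, hz⟩ := hvs y hy
      rw [hz]
      exact ⟨PySem.Int.mod_nonneg z hpos, PySem.Int.mod_lt z hpos⟩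
    have gle : ∀ y ∈ sub, y ≤ item → PySem.Int.mod (item - y + m) m = item - y := by
      intro y hy h
      have h1 := (hyb y hy).1
      have h2 := hitemb.2
      exact pvmod_small hpos (by omega) (by omega)
    have ggt : ∀ y ∈ sub, item < y → PySem.Int.mod (item - y + m) m = item - y + m := by
      intro y hy h
      have h1 := (hyb y hy).2
      have h2 := hitemb.1
      exact pvmod_id hpos (by omega) (by omega)
    refine ⟨hperm', hpw, hlen', ?_, ?_⟩
    · rw [hsndA]
      exact le_trans hitemb.1 (le_max_right _ _)
    · rcases Nat.lt_or_ge pos sub.length with hposlt | hposge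
      · -- strictly greater element exists: A picks the smallest one, B scans them all
        have hcond : ((pos : Int) < (t : Int)) := by exact_mod_cast hlen ▸ hposlt
        have hjmem : sub[pos] ∈ sub := List.getElem_mem hposlt
        have hjgt : item < sub[pos] := hgt pos hposlt le_rfl
        have hA : (pvStepA m P (sub, b) (t : Int)).2 =
            max (max b (item - sub[pos] + m)) item := by
          rw [hsndA, if_pos hcond, List.getD_eq_getElem sub 0 hposlt, if_pos hjgt,
            ggt sub[pos] hjmem hjgt]
        have hB : pvStepB m P b (t : Int) = max (max b item) (item - sub[pos] + m) := by
          rw [hsndB]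
          rw [show sub.foldl (fun bb y => max bb (PySem.Int.mod (item - y + m) m)) (max b item) =
              (sub.take pos ++ sub.drop pos).foldl
                (fun bb y => max bb (PySem.Int.mod (item - y + m) m)) (max b item) by
            rw [List.take_append_drop]]
          rw [List.foldl_append]
          rw [pvFoldl_max_absorb (sub.take pos) (max b item) (fun y hy => by
            rw [gle y (List.mem_of_mem_take hy) (htake y hy)]
            have := (hyb y (List.mem_of_mem_take hy)).1
            have := htake y hy
            omega)]
          rw [List.drop_eq_getElem_cons hposlt]
          simp only [List.foldl_cons]
          rw [ggt sub[pos] hjmem hjgt]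
          refine pvFoldl_max_absorb _ _ (fun y hy => ?_)
          rw [List.mem_drop_iff_getElem] at hy
          obtain ⟨j, hj, rfl⟩ := hy
          have hymem : sub[pos + 1 + j] ∈ sub := List.getElem_mem (by omega)
          have hygt : item < sub[pos + 1 + j] := hgt (pos + 1 + j) (by omega) (by omega)
          rw [ggt _ hymem hygt]
          have hmono : sub[pos] ≤ sub[pos + 1 + j] :=
            List.pairwise_iff_getElem.mp hsorted pos (pos + 1 + j) hposlt (by omega) (by omega)
          have := le_max_right (max b item) (item - sub[pos] + m)
          omega
        rw [hA, hB, max_right_comm]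
      · -- no strictly greater element: A adds nothing, B's scanned candidates are all ≤ item
        have hposeq : pos = sub.length := le_antisymm hpos_le hposge
        have hallle : ∀ y ∈ sub, y ≤ item := by
          intro y hy
          obtain ⟨j, hj, rfl⟩ := List.mem_iff_getElem.mp hy
          exact hle j hj (by omega)
        have hA : (pvStepA m P (sub, b) (t : Int)).2 = max b item := by
          rw [hsndA, hposeq, hlen, if_neg (lt_irrefl ((t : Nat) : Int)),
            if_neg (by have := hitemb.1; omega)]
        have hB : pvStepB m P b (t : Int) = max b item := by
          rw [hsndB]
          refine pvFoldl_max_absorb _ _ (fun y hy => ?_)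
          rw [gle y hy (hallle y hy)]
          have := (hyb y hy).1
          have := le_max_right b item
          omega
        rw [hA, hB]

lemma pvMain (m : Int) (P : List Int) (hm : m ≠ 0) (N : Nat)
    (hv : ∀ k : Nat, k < N → ∃ y, P.getD k 0 = PySem.Int.mod y m) :
    ∀ t, t ≤ N →
      (((List.range t).foldl (fun st (k : Nat) => pvStepA m P st (k : Int)) ([], 0)).1.Perm
        ((List.range t).map (fun k => P.getD k 0))) ∧
      ((List.range t).foldl (fun st (k : Nat) => pvStepA m P st (k : Int)) ([], 0)).1.Pairwise (· ≤ ·) ∧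
      ((List.range t).foldl (fun st (k : Nat) => pvStepA m P st (k : Int)) ([], 0)).1.length = t ∧
      0 ≤ ((List.range t).foldl (fun st (k : Nat) => pvStepA m P st (k : Int)) ([], 0)).2 ∧
      ((List.range t).foldl (fun st (k : Nat) => pvStepA m P st (k : Int)) ([], 0)).2 =
        (List.range t).foldl (fun b (k : Nat) => pvStepB m P b (k : Int)) 0 := by
  intro t
  induction t with
  | zero => simp
  | succ t ih =>
      intro h
      obtain ⟨ihperm, ihsorted, ihlen, ihb, iheq⟩ := ih (by omega)
      set stA := (List.range t).foldl (fun st (k : Nat) => pvStepA m P st (k : Int)) ([], 0) with hstA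
      have hvs : ∀ y ∈ stA.1, ∃ z, y = PySem.Int.mod z m := by
        intro y hy
        have hy' := ihperm.mem_iff.mp hy
        rw [List.mem_map] at hy'
        obtain ⟨k, hk, rfl⟩ := hy'
        rw [List.mem_range] at hk
        obtain ⟨z, hz⟩ := hv k (by omega)
        exact ⟨z, hz⟩
      have key := pvStep_key m P hm stA.1 stA.2 t ihperm ihsorted ihlen ihb hvs (hv t (by omega))
      rw [List.range_succ, List.foldl_append, List.foldl_append]
      simp only [List.foldl_cons, List.foldl_nil, ← hstA, ← iheq]
      simpa [List.range_succ] using key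

-- ===== VERDICT (by name: the statement is the Claim_ definition above) =====
theorem find_max_mod_spec : Claim_equal_find_max_mod := by
  intro n m ar _ hpre
  obtain ⟨hm, har, hlen⟩ := hpre
  unfold Spec_find_max_mod
  rw [pvPortA_eq, pvPortB_eq]
  rw [PySem.List.pyRange_one]
  simp only [List.foldl_map, zero_add, Int.sub_zero]
  have hv := pvP_modvals n m ar har hlen
  have hv' : ∀ k : Nat, k < n.toNat → ∃ y, (pvP n m ar).getD k 0 = PySem.Int.mod y m := by
    intro k hk; exact hv k (by omega)
  exact (pvMain m (pvP n m ar) hm n.toNat hv' n.toNat le_rfl).2.2.2.2
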